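-- pv_equiv track=rewrite | github.com/coollabsio/coolify | templates/Epicyon/epicyon-data/markdown.py | markdown_example_numbers
-- ===== SOURCE A (Python) =====
-- def markdown_example_numbers(markdown: str) -> str:
--     """Ensures that example numbers in the ActivityPub specification
--     document are sequential
--     """
--     lines = markdown.split('\n')
--     example_number = 1
--     line_ctr = 0
--     for line in lines:
--         if not line.strip():
--             # skip blank lines
--             line_ctr += 1
--             continue
--         if line.startswith('##') and '## Example ' in line:
--             header_str = line.split(' Example ')[0]
--             lines[line_ctr] = header_str + ' Example ' + str(example_number)
--             example_number += 1
--         line_ctr += 1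
--
--     markdown = ''
--     for line in lines:
--         markdown += line + '\n'
--     return markdown
-- ===== SOURCE B (Python) =====
-- def markdown_example_numbers(markdown: str) -> str:
--     """Ensures that example numbers in the ActivityPub specification
--     document are sequential
--     """
--     lines = markdown.split('\n')
--
--     def is_hdr(line):
--         return line.startswith('##') and '## Example ' in line
--
--     # pass 1: how many example headers there are in total
--     n = sum(1 for line in lines if is_hdr(line))
--     # pass 2: walk the document BACKWARDS, handing out numbers n, n-1, ..., 1
--     out = []
--     for line in reversed(lines):
--         if is_hdr(line):
--             out.append(line.split(' Example ')[0] + ' Example ' + str(n) + '\n')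
--             n -= 1
--         else:
--             out.append(line + '\n')
--     return ''.join(reversed(out))
-- ===== Notes on version B (the rewrite author's own statement) =====
-- stated objective: alternative
-- what changed: Instead of A's forward scan with an in-place list mutation via an index counter and a running example number, B first counts the example headers in one pass and then traverses the document BACKWARDS handing out numbers total..1, joining the reversed output once; correct because the j-th header forward receives total minus the number of headers after it, which is j.
import Mathlib
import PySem

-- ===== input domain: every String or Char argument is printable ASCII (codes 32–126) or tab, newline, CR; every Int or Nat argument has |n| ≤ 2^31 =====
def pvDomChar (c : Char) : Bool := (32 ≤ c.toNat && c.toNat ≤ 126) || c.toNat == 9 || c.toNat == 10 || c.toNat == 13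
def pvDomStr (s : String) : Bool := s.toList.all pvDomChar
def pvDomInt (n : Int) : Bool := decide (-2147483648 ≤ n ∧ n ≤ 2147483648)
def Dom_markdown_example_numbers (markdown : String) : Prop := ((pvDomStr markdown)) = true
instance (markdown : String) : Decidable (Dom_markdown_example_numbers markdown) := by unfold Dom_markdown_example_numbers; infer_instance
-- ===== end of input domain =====

-- B renumbers the example headers with two staged passes: a counting pass, then a BACKWARD
-- traversal that hands out the numbers total..1 and joins the reversed output once;
-- objective: alternative (a different traversal order with a proof that it agrees).

-- ===== PORT A =====
-- line.split(' Example ')[0]  (sep is nonempty, so split? is some; the list is never empty)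
def pvHeader (line : String) : String :=
  ((PySem.List.pyGet? ((PySem.Str.split? line " Example ").getD []) 0).getD "")

-- line.startswith('##') and '## Example ' in line
def pvIsHdr (line : String) : Bool :=
  PySem.Str.startswith line "##" && PySem.Str.isIn "## Example " line

-- the 'for line in lines' loop of A: reads lines[line_ctr] and mutates it in place
def pvLoopA (lines : List String) (i : Nat) (n : Int) : List String :=
  if h : i < lines.length then
    let line := lines[i]
    if PySem.Str.strip line = "" then
      pvLoopA lines (i + 1) n
    else if pvIsHdr line then
      pvLoopA (lines.set i (pvHeader line ++ " Example " ++ PySem.Int.toStr n)) (i + 1) (n + 1)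
    else
      pvLoopA lines (i + 1) n
  else lines
termination_by lines.length - i
decreasing_by all_goals first | (simp only [List.length_set]; omega) | omega

def markdown_example_numbers (markdown : String) : String :=
  let lines := (PySem.Str.split? markdown "\n").getD []
  let lines' := pvLoopA lines 0 1
  lines'.foldl (fun acc line => acc ++ line ++ "\n") ""

-- ===== PORT B =====
def markdown_example_numbers_alt (markdown : String) : String :=
  let lines := (PySem.Str.split? markdown "\n").getD []
  -- n = sum(1 for line in lines if is_hdr(line))
  let total := lines.foldl (fun (c : Int) line => if pvIsHdr line then c + 1 else c) 0
  -- for line in reversed(lines): append numbered/plain line, counting DOWN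
  let st := lines.reverse.foldl
    (fun (st : List String × Int) line =>
      if pvIsHdr line then
        (st.1 ++ [pvHeader line ++ " Example " ++ PySem.Int.toStr st.2 ++ "\n"], st.2 - 1)
      else
        (st.1 ++ [line ++ "\n"], st.2))
    ([], total)
  PySem.Str.join "" st.1.reverse

-- ===== PRECONDITION & SPEC =====
def Spec_markdown_example_numbers (markdown : String) (out : String) : Prop := out = markdown_example_numbers_alt markdown
instance (markdown : String) (out : String) : Decidable (Spec_markdown_example_numbers markdown out) := by unfold Spec_markdown_example_numbers; infer_instance

-- ===== CLAIM (what is proved, stated in full; the proofs are below) =====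
def Claim_equal_markdown_example_numbers : Prop := ∀ (markdown : String), Dom_markdown_example_numbers markdown → Spec_markdown_example_numbers markdown (markdown_example_numbers markdown)

-- ===== LEMMAS AND PROOFS =====

-- the forward renumbering of a list of lines, as a structural recursion (reference form)
def pvSpecLines : List String → Int → List String
  | [], _ => []
  | l :: ls, n =>
    if pvIsHdr l then
      (pvHeader l ++ " Example " ++ PySem.Int.toStr n) :: pvSpecLines ls (n + 1)
    else l :: pvSpecLines ls n

-- number of header lines, structurally
def pvHC : List String → Int
  | [] => 0
  | l :: t => (if pvIsHdr l then 1 else 0) + pvHC t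

-- B's backward pass, structurally (front of the argument = end of the document)
def pvBgo : List String → Int → List String
  | [], _ => []
  | l :: t, n =>
    if pvIsHdr l then
      (pvHeader l ++ " Example " ++ PySem.Int.toStr n ++ "\n") :: pvBgo t (n - 1)
    else (l ++ "\n") :: pvBgo t n

-- an all-whitespace line cannot start with '##'
lemma pv_blank_not_header (l : String) (hb : PySem.Str.strip l = "") :
    pvIsHdr l = false := by
  unfold pvIsHdr
  by_contra h
  rw [Bool.not_eq_false, Bool.and_eq_true] at h
  have hs := h.1
  rw [PySem.Str.startswith_eq, PySem.Chars.startswith_iff] at hs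
  obtain ⟨t, ht⟩ := hs
  have hnil : (PySem.Str.strip l).toList = [] := by rw [hb]; rfl
  rw [PySem.Str.toList_strip, ← ht] at hnil
  simp only [PySem.Chars.strip, PySem.Chars.rstrip, PySem.Chars.lstrip] at hnil
  rw [List.reverse_eq_nil_iff, List.dropWhile_eq_nil_iff] at hnil
  have ht2 : "##".toList = ['#', '#'] := rfl
  rw [ht2] at hnil
  have hd : List.dropWhile PySem.Chars.isspace (['#', '#'] ++ t) = '#' :: '#' :: t := by
    simp only [List.cons_append, List.nil_append]
    exact List.dropWhile_cons_of_neg (by decide)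
  have := hnil '#' (by rw [hd]; simp)
  exact absurd this (by decide)

-- A's in-place loop computes pvSpecLines on the untouched suffix
lemma pv_loopA (k : Nat) : ∀ (lines : List String) (i : Nat) (n : Int), lines.length - i = k →
    pvLoopA lines i n = lines.take i ++ pvSpecLines (lines.drop i) n := by
  induction k with
  | zero =>
    intro lines i n hk
    rw [pvLoopA, dif_neg (by omega)]
    rw [List.drop_of_length_le (by omega), List.take_of_length_le (by omega)]
    simp [pvSpecLines]
  | succ k ih =>
    intro lines i n hk
    have hi : i < lines.length := by omega
    rw [pvLoopA, dif_pos hi]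
    simp only
    rw [List.drop_eq_getElem_cons hi]
    by_cases hb : PySem.Str.strip lines[i] = ""
    · rw [if_pos hb, ih lines (i + 1) n (by omega)]
      simp only [pvSpecLines, pv_blank_not_header _ hb, Bool.false_eq_true, if_false]
      rw [List.take_add_one, List.getElem?_eq_getElem hi]
      simp only [Option.toList_some, List.append_assoc, List.singleton_append]
    · rw [if_neg hb]
      by_cases hc : pvIsHdr lines[i] = true
      · rw [if_pos hc]
        simp only [pvSpecLines, hc, if_true]
        rw [ih _ (i + 1) (n + 1) (by simp only [List.length_set]; omega)]
        have hdrop : (lines.set i (pvHeader lines[i] ++ " Example " ++ PySem.Int.toStr n)).drop (i + 1) = lines.drop (i + 1) := by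
          rw [List.set_eq_take_append_cons_drop, if_pos hi, List.drop_append]
          simp [Nat.min_eq_left (Nat.le_of_lt hi), List.length_take]
        have htake : (lines.set i (pvHeader lines[i] ++ " Example " ++ PySem.Int.toStr n)).take (i + 1) = lines.take i ++ [pvHeader lines[i] ++ " Example " ++ PySem.Int.toStr n] := by
          rw [List.set_eq_take_append_cons_drop, if_pos hi, List.take_append]
          simp [Nat.min_eq_left (Nat.le_of_lt hi), List.length_take]
        rw [hdrop, htake]
        simp
      · rw [if_neg hc]
        rw [ih lines (i + 1) n (by omega)]
        simp only [pvSpecLines]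
        rw [if_neg hc]
        rw [List.take_add_one, List.getElem?_eq_getElem hi]
        simp only [Option.toList_some, List.append_assoc, List.singleton_append]

-- B's counting pass is pvHC
lemma pv_count (ls : List String) (c : Int) :
    ls.foldl (fun (c : Int) line => if pvIsHdr line then c + 1 else c) c = c + pvHC ls := by
  induction ls generalizing c with
  | nil => simp [pvHC]
  | cons l t ih =>
    rw [List.foldl_cons]
    by_cases h : pvIsHdr l = true <;> simp only [pvHC, h, if_true, if_false, Bool.false_eq_true] <;> rw [ih] <;> ring

-- B's backward fold accumulates pvBgo
lemma pv_foldB (ls : List String) (acc : List String) (n : Int) :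
    (ls.foldl
      (fun (st : List String × Int) line =>
        if pvIsHdr line then
          (st.1 ++ [pvHeader line ++ " Example " ++ PySem.Int.toStr st.2 ++ "\n"], st.2 - 1)
        else
          (st.1 ++ [line ++ "\n"], st.2))
      (acc, n)).1 = acc ++ pvBgo ls n := by
  induction ls generalizing acc n with
  | nil => simp [pvBgo]
  | cons l t ih =>
    rw [List.foldl_cons]
    by_cases h : pvIsHdr l = true
    · rw [if_pos h]; simp only [pvBgo, h, if_true]; rw [ih]; simp
    · rw [if_neg h]; simp only [pvBgo, h, Bool.false_eq_true, if_false]; rw [ih]; simp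

lemma pv_bgo_append (xs ys : List String) (n : Int) :
    pvBgo (xs ++ ys) n = pvBgo xs n ++ pvBgo ys (n - pvHC xs) := by
  induction xs generalizing n with
  | nil => simp [pvBgo, pvHC]
  | cons l t ih =>
    by_cases h : pvIsHdr l = true
    · simp only [List.cons_append, pvBgo, pvHC, h, if_true, ih]
      have : n - 1 - pvHC t = n - (1 + pvHC t) := by ring
      rw [this]
    · simp only [List.cons_append, pvBgo, pvHC, h, Bool.false_eq_true, if_false, ih]
      have : n - pvHC t = n - (0 + pvHC t) := by ring
      rw [this]

lemma pv_bgo_hc_append (xs ys : List String) : pvHC (xs ++ ys) = pvHC xs + pvHC ys := by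
  induction xs with
  | nil => simp [pvHC]
  | cons l t ih => simp only [List.cons_append, pvHC, ih]; ring

lemma pv_hc_reverse (ls : List String) : pvHC ls.reverse = pvHC ls := by
  induction ls with
  | nil => rfl
  | cons l t ih =>
    rw [List.reverse_cons, pv_bgo_hc_append]
    · simp only [pvHC, ih]; ring


-- the backward pass, reversed, is the forward renumbering (with '\n' appended to each line)
lemma pv_bgo_spec (ls : List String) (n : Int) :
    (pvBgo ls.reverse (n + pvHC ls)).reverse = (pvSpecLines ls (n + 1)).map (fun l => l ++ "\n") := by
  induction ls generalizing n with
  | nil => simp [pvBgo, pvSpecLines, pvHC]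
  | cons l t ih =>
    rw [List.reverse_cons, pv_bgo_append, pv_hc_reverse]
    by_cases h : pvIsHdr l = true
    · simp only [pvHC, h, if_true]
      have h1 : n + (1 + pvHC t) - pvHC t = n + 1 := by ring
      have h2 : n + (1 + pvHC t) = (n + 1) + pvHC t := by ring
      rw [h1, h2, List.reverse_append, ih (n + 1)]
      simp [pvBgo, pvSpecLines, h]
    · simp only [pvHC, h, Bool.false_eq_true, if_false]
      have h1 : n + (0 + pvHC t) - pvHC t = n := by ring
      have h2 : n + (0 + pvHC t) = n + pvHC t := by ring
      rw [h1, h2, List.reverse_append, ih n]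
      simp [pvBgo, pvSpecLines, h]

-- join '' over lines each carrying its '\n' equals A's concatenation loop
lemma pv_concat (ls : List String) (a : String) :
    ls.foldl (fun acc line => acc ++ line ++ "\n") a
      = a ++ PySem.Str.join "" (ls.map (fun l => l ++ "\n")) := by
  induction ls generalizing a with
  | nil =>
    apply String.toList_inj.mp
    simp [PySem.Str.toList_join, PySem.Chars.join, List.intercalate, String.toList_append]
  | cons l t ih =>
    rw [List.foldl_cons, ih]
    apply String.toList_inj.mp
    cases t with
    | nil =>
      simp [PySem.Str.toList_join, PySem.Chars.join, List.intercalate, String.toList_append]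
    | cons y u =>
      simp [PySem.Str.toList_join, String.toList_append, PySem.Chars.join_cons_cons]

-- ===== VERDICT (by name: the statement is the Claim_ definition above) =====
theorem markdown_example_numbers_spec : Claim_equal_markdown_example_numbers := by
  intro markdown _
  unfold Spec_markdown_example_numbers markdown_example_numbers markdown_example_numbers_alt
  simp only []
  rw [pv_loopA ((PySem.Str.split? markdown "\n").getD []).length _ 0 1 (by omega)]
  rw [pv_count, pv_foldB]
  simp only [List.take_zero, List.drop_zero, List.nil_append, zero_add]
  have := pv_bgo_spec ((PySem.Str.split? markdown "\n").getD []) 0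
  rw [zero_add] at this
  rw [this, pv_concat]
  apply String.toList_inj.mp
  simp [String.toList_append]
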